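-- pv_equiv track=rewrite | github.com/Fatcatcreate/Portfolio | ProjectEuler/Problem-248/code.py | InverseEulerPhi
-- ===== SOURCE A (Python) =====
-- import math
-- from collections import defaultdict
--
-- def Divisors(n):
--     divs, root = [], int(math.isqrt(n))
--     for i in range(1, root + 1):
--         if n % i == 0:
--             divs.append(i)
--             if i != n // i:
--                 divs.append(n // i)
--     return sorted(divs)
--
-- def IsPrime(n):
--     if n < 2: return False
--     for i in range(2, int(math.isqrt(n)) + 1):
--         if n % i == 0: return False
--     return True
--
-- def Valuation(n, p):
--     v = 0
--     while n % p == 0: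
--         n //= p
--         v += 1
--     return v
--
-- def InverseEulerPhi(n):
--     r = defaultdict(list)
--     r[1] = [1]
--     for d in Divisors(n):
--         if IsPrime(d + 1):
--             temp = defaultdict(list)
--             max_k = Valuation(n, d + 1) + 1
--             for k in range(1, max_k + 1):
--                 u = d * (d + 1) ** (k - 1)
--                 v = (d + 1) ** k
--                 for f in Divisors(n // u):
--                     if f in r:
--                         temp[f * u].extend([v * x for x in r[f]])
--             for i, vlist in temp.items():
--                 r[i].extend(vlist)
--     return sorted(r[n]) if n in r else []
-- ===== SOURCE B (Python) =====
-- import math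
--
--
-- def Divisors(n):
--     divs, root = [], int(math.isqrt(n))
--     for i in range(1, root + 1):
--         if n % i == 0:
--             divs.append(i)
--             if i != n // i:
--                 divs.append(n // i)
--     return sorted(divs)
--
--
-- def IsPrime(n):
--     if n < 2: return False
--     for i in range(2, int(math.isqrt(n)) + 1):
--         if n % i == 0: return False
--     return True
--
--
-- def InverseEulerPhi(n):
--     # primes p whose phi-contribution (p-1) can divide n, computed once, increasing
--     primes = [d + 1 for d in Divisors(n) if IsPrime(d + 1)]
--
--     def rec(ps, remaining):
--         # all m built from a subset of the primes in ps (kept in increasing order)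
--         # with phi(m) == remaining
--         if not ps:
--             return [1] if remaining == 1 else []
--         p, rest = ps[0], ps[1:]
--         res = rec(rest, remaining)          # solutions not using p
--         u, pk = p - 1, p                    # u = phi(p^k), pk = p^k, k = 1, 2, ...
--         while u <= remaining:
--             if remaining % u == 0:
--                 res += [pk * t for t in rec(rest, remaining // u)]
--             u, pk = u * p, pk * p
--         return res
--
--     return sorted(rec(primes, n))
-- ===== Notes on version B (the rewrite author's own statement) =====
-- stated objective: alternative
-- what changed: A builds every inverse-phi value bottom-up in a dict of lists keyed by partial totient products over all divisors of n; B precomputes the candidate primes once and generates the same values by a direct top-down recursion over that prime list, with no dict and no per-prime re-scan of n's divisors.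
import Mathlib
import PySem

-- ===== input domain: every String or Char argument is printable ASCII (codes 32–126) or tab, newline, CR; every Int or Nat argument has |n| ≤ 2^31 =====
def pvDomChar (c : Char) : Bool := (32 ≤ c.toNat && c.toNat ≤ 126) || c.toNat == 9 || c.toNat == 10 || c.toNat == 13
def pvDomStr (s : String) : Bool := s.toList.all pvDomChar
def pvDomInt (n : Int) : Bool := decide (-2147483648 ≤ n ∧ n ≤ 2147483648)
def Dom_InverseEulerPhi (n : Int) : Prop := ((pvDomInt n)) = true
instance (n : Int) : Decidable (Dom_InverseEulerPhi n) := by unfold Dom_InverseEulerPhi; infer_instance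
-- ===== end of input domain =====

-- B replaces A's bottom-up dict-of-lists dynamic programming over the divisors of n by a
-- direct top-down recursion over the (once precomputed) candidate prime list; same return
-- value on every input Pre_ admits (outside it A raises ValueError from math.isqrt).

-- ===== PORT A =====
-- math.isqrt(n): Nat.sqrt is exact for 0 ≤ n (math.isqrt raises ValueError on n < 0, excluded by Pre_)
def pvIsqrt (n : Int) : Int := ((Int.toNat n).sqrt : Int)

def pvDivisors (n : Int) : List Int :=
  let root := pvIsqrt n
  let divs : List Int := (PySem.List.pyRange 1 (root + 1) 1).foldl (fun divs i =>
    if PySem.Int.mod n i = 0 then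
      let divs := divs ++ [i]
      if i ≠ PySem.Int.floordiv n i then divs ++ [PySem.Int.floordiv n i] else divs
    else divs) []
  PySem.List.sorted divs (fun x => x) false

-- the early-return trial-division loop, as the equivalent List.all
def pvIsPrime (n : Int) : Bool :=
  if n < 2 then false
  else (PySem.List.pyRange 2 (pvIsqrt n + 1) 1).all (fun i => !(PySem.Int.mod n i == 0))

-- the 'while n % p == 0' loop; the guard '2 ≤ p ∧ 1 ≤ n' only makes the recursion total
-- (every call A makes has 2 ≤ p and 1 ≤ n; Python would not terminate otherwise)
def pvValuation (n p : Int) : Int :=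
  if h : PySem.Int.mod n p = 0 ∧ 2 ≤ p ∧ 1 ≤ n then
    pvValuation (PySem.Int.floordiv n p) p + 1
  else 0
termination_by n.toNat
decreasing_by
  have hp : (0:Int) < p := by omega
  have he : PySem.Int.floordiv n p = n / p := PySem.Int.floordiv_eq_ediv_of_pos hp
  have h2 : n / p < n := by
    rcases h with ⟨hm, hp2, hn1⟩
    have hdvd : p ∣ n := (PySem.Int.mod_eq_zero_iff_dvd n p).mp hm
    obtain ⟨c, rfl⟩ := hdvd
    rw [Int.mul_ediv_cancel_left _ (by omega : p ≠ 0)]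
    nlinarith
  have h3 : 0 ≤ n / p := Int.ediv_nonneg (by omega) (by omega)
  omega

def InverseEulerPhi (n : Int) : List Int :=
  let r : PySem.Dict Int (List Int) := PySem.Dict.empty.insert 1 [1]
  let r := (pvDivisors n).foldl (fun r d =>
    if pvIsPrime (d + 1) then
      let maxk := pvValuation n (d + 1) + 1
      let temp : PySem.Dict Int (List Int) :=
        (PySem.List.pyRange 1 (maxk + 1) 1).foldl (fun temp k =>
          let u := d * (d + 1) ^ (k - 1).toNat
          let v := (d + 1) ^ k.toNat
          (pvDivisors (PySem.Int.floordiv n u)).foldl (fun temp f =>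
            if r.contains f then
              temp.modify (f * u) [] (fun l => l ++ (r.getD f []).map (fun x => v * x))
            else temp) temp) PySem.Dict.empty
      temp.items.foldl (fun r iv => r.modify iv.1 [] (fun l => l ++ iv.2)) r
    else r) r
  if r.contains n then PySem.List.sorted (r.getD n []) (fun x => x) false else []

-- ===== PORT B =====
-- the 'while u <= remaining' loop of Source B; guard '1 ≤ u ∧ 2 ≤ p' only makes it total
-- (every call B makes has u = (p-1)·p^j ≥ 1 and p ≥ 2)
def pvRecLoop (recRest : Int → List Int) (remaining p : Int) (u pk : Int) (res : List Int) : List Int :=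
  if h : u ≤ remaining ∧ 1 ≤ u ∧ 2 ≤ p then
    let res := if PySem.Int.mod remaining u = 0 then
        res ++ (recRest (PySem.Int.floordiv remaining u)).map (fun t => pk * t)
      else res
    pvRecLoop recRest remaining p (u * p) (pk * p) res
  else res
termination_by (remaining + 1 - u).toNat
decreasing_by
  have : u + 1 ≤ u * p := by nlinarith [h.2.1, h.2.2]
  omega

def pvRec : List Int → Int → List Int
  | [], remaining => if remaining = 1 then [1] else []
  | p :: rest, remaining =>
      pvRecLoop (pvRec rest) remaining p (p - 1) p (pvRec rest remaining)

def InverseEulerPhi_alt (n : Int) : List Int :=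
  let primes := ((pvDivisors n).filter (fun d => pvIsPrime (d + 1))).map (fun d => d + 1)
  PySem.List.sorted (pvRec primes n) (fun x => x) false

-- ===== PRECONDITION & SPEC =====
-- Pre_ excludes exactly n < 0, where A raises ValueError (math.isqrt of a negative number).
def Pre_InverseEulerPhi (n : Int) : Prop := 0 ≤ n
instance (n : Int) : Decidable (Pre_InverseEulerPhi n) := by unfold Pre_InverseEulerPhi; infer_instance
def pvWitness_InverseEulerPhi : Int := (8)

def Spec_InverseEulerPhi (n : Int) (out : List Int) : Prop := out = InverseEulerPhi_alt n
instance (n : Int) (out : List Int) : Decidable (Spec_InverseEulerPhi n out) := by unfold Spec_InverseEulerPhi; infer_instance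

-- ===== CLAIM (what is proved, stated in full; the proofs are below) =====
def Claim_equal_InverseEulerPhi : Prop := ∀ (n : Int), Dom_InverseEulerPhi n → Pre_InverseEulerPhi n → Spec_InverseEulerPhi n (InverseEulerPhi n)

-- ===== LEMMAS AND PROOFS =====

def phik (p k : Int) : Int := (p - 1) * p ^ (k - 1).toNat

def pkpow (p k : Int) : Int := p ^ k.toNat

def phip (Q : List (Int × Int)) : Int := (Q.map (fun e => phik e.1 e.2)).prod

def pval (Q : List (Int × Int)) : Int := (Q.map (fun e => pkpow e.1 e.2)).prod

def pvDivChunk (n i : Int) : List Int :=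
  if PySem.Int.mod n i = 0 then
    if i ≠ PySem.Int.floordiv n i then [i, PySem.Int.floordiv n i] else [i]
  else []

def EL (E : Int → List (List (Int × Int))) (x p u k : Int) (res : List (List (Int × Int))) :
    List (List (Int × Int)) :=
  if h : u ≤ x ∧ 1 ≤ u ∧ 2 ≤ p then
    let res := if PySem.Int.mod x u = 0 then
        res ++ (E (PySem.Int.floordiv x u)).map (fun Q => (p, k) :: Q)
      else res
    EL E x p (u * p) (k + 1) res
  else res
termination_by (x + 1 - u).toNat
decreasing_by
  have : u + 1 ≤ u * p := by nlinarith [h.2.1, h.2.2]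
  omega

def Epat : List Int → Int → List (List (Int × Int))
  | [], x => if x = 1 then [[]] else []
  | p :: rest, x => EL (Epat rest) x p (p - 1) 1 (Epat rest x)

def pairsP (n p : Int) : List (Int × Int) :=
  (PySem.List.pyRange 1 (pvValuation n p + 1 + 1) 1).flatMap (fun k =>
    (pvDivisors (PySem.Int.floordiv n (phik p k))).map (fun f => (k, f)))

def AStepP (n : Int) (σ : Int → List (List (Int × Int))) (p : Int) : Int → List (List (Int × Int)) :=
  fun x => σ x ++
    ((pairsP n p).filter (fun kf => !(σ kf.2).isEmpty && (kf.2 * phik p kf.1 == x))).flatMap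
      (fun kf => (σ kf.2).map (fun Q => Q ++ [(p, kf.1)]))

def sigma0 : Int → List (List (Int × Int)) := fun x => if x = 1 then [[]] else []

def AOKr (n : Int) : List (Int × Int) → Prop
  | [] => True
  | e :: S => 1 ≤ e.2 ∧ e.2 ≤ pvValuation n e.1 + 1 ∧
      1 ≤ phip S.reverse ∧ phip S.reverse ∣ PySem.Int.floordiv n (phik e.1 e.2) ∧
      1 ≤ PySem.Int.floordiv n (phik e.1 e.2) ∧ AOKr n S

def AOK (n : Int) (Q : List (Int × Int)) : Prop := AOKr n Q.reverse

def cbody (n : Int) : PySem.Dict Int (List Int) → Int → PySem.Dict Int (List Int) := fun r d =>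
    if pvIsPrime (d + 1) then
      ((PySem.List.pyRange 1 (pvValuation n (d + 1) + 1 + 1) 1).foldl (fun temp k =>
          (pvDivisors (PySem.Int.floordiv n (d * (d + 1) ^ (k - 1).toNat))).foldl (fun temp f =>
            if r.contains f then
              temp.modify (f * (d * (d + 1) ^ (k - 1).toNat)) []
                (fun l => l ++ (r.getD f []).map (fun x => (d + 1) ^ k.toNat * x))
            else temp) temp) (PySem.Dict.empty : PySem.Dict Int (List Int))).items.foldl
        (fun r iv => r.modify iv.1 [] (fun l => l ++ iv.2)) r
    else r

def abody (n : Int) : (Int → List (List (Int × Int))) → Int → (Int → List (List (Int × Int))) :=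
  fun σ d => if pvIsPrime (d + 1) then AStepP n σ (d + 1) else σ

lemma phik_pos (p k : Int) (hp : 2 ≤ p) (hk : 1 ≤ k) : 1 ≤ phik p k := by
  unfold phik
  have h1 : (1:Int) ≤ p - 1 := by omega
  have h2 : (1:Int) ≤ p ^ (k - 1).toNat := one_le_pow₀ (by omega : (1:Int) ≤ p)
  nlinarith

lemma phip_pos (Q : List (Int × Int)) (h : ∀ e ∈ Q, 2 ≤ e.1 ∧ 1 ≤ e.2) : 1 ≤ phip Q := by
  induction Q with
  | nil => simp [phip]
  | cons e S ih =>
    have he := h e (by simp)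
    have h1 := phik_pos e.1 e.2 he.1 he.2
    have h2 := ih (fun x hx => h x (by simp [hx]))
    simp only [phip, List.map_cons, List.prod_cons] at *
    nlinarith

lemma phip_append (Q R : List (Int × Int)) : phip (Q ++ R) = phip Q * phip R := by
  simp [phip, List.prod_append]

lemma pvValuation_nonneg (n p : Int) : 0 ≤ pvValuation n p := by
  rw [pvValuation]
  split
  · have := pvValuation_nonneg (PySem.Int.floordiv n p) p
    omega
  · omega
termination_by n.toNat
decreasing_by
  rename_i h
  have hp : (0:Int) < p := by omega
  have he : PySem.Int.floordiv n p = n / p := PySem.Int.floordiv_eq_ediv_of_pos hp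
  have h2 : n / p < n := by
    rcases h with ⟨hm, hp2, hn1⟩
    have hdvd : p ∣ n := (PySem.Int.mod_eq_zero_iff_dvd n p).mp hm
    obtain ⟨c, rfl⟩ := hdvd
    rw [Int.mul_ediv_cancel_left _ (by omega : p ≠ 0)]
    nlinarith
  have h3 : 0 ≤ n / p := Int.ediv_nonneg (by omega) (by omega)
  omega

lemma le_pvValuation (n p : Int) (hn : 1 ≤ n) (hp : 2 ≤ p) (j : Nat) (hd : (p ^ j : Int) ∣ n) :
    (j : Int) ≤ pvValuation n p := by
  induction j generalizing n with
  | zero =>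
    have := pvValuation_nonneg n p
    push_cast
    omega
  | succ m ih =>
    have hpd : p ∣ n := dvd_trans (dvd_pow_self p (Nat.succ_ne_zero m)) hd
    have hmod : PySem.Int.mod n p = 0 := (PySem.Int.mod_eq_zero_iff_dvd n p).mpr hpd
    rw [pvValuation]
    rw [dif_pos ⟨hmod, hp, hn⟩]
    have he : PySem.Int.floordiv n p = n / p := PySem.Int.floordiv_eq_ediv_of_pos (by omega)
    obtain ⟨c, rfl⟩ := hpd
    have hc1 : 1 ≤ c := by nlinarith
    have hdc : (p ^ m : Int) ∣ c := by
      have : (p * p ^ m : Int) ∣ p * c := by rw [← pow_succ']; exact hd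
      exact (mul_dvd_mul_iff_left (by omega : (p:Int) ≠ 0)).mp this
    have : PySem.Int.floordiv (p * c) p = c := by
      rw [he, Int.mul_ediv_cancel_left _ (by omega : p ≠ 0)]
    rw [this]
    have := ih c hc1 hdc
    push_cast
    omega

lemma pvDivisors_eq (n : Int) :
    pvDivisors n = PySem.List.sorted
      ((PySem.List.pyRange 1 (pvIsqrt n + 1) 1).flatMap (pvDivChunk n)) (fun x => x) false := by
  show PySem.List.sorted
      ((PySem.List.pyRange 1 (pvIsqrt n + 1) 1).foldl (fun divs i =>
        if PySem.Int.mod n i = 0 then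
          let divs := divs ++ [i]
          if i ≠ PySem.Int.floordiv n i then divs ++ [PySem.Int.floordiv n i] else divs
        else divs) []) (fun x => x) false = _
  congr 1
  calc (PySem.List.pyRange 1 (pvIsqrt n + 1) 1).foldl (fun divs i =>
        if PySem.Int.mod n i = 0 then
          let divs := divs ++ [i]
          if i ≠ PySem.Int.floordiv n i then divs ++ [PySem.Int.floordiv n i] else divs
        else divs) []
      = (PySem.List.pyRange 1 (pvIsqrt n + 1) 1).foldl (fun divs i => divs ++ pvDivChunk n i) [] := by
        apply PySem.List.foldl_congr_mem
        intro acc i _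
        simp only [pvDivChunk]
        split_ifs with h1 h2 <;> simp
    _ = [] ++ (PySem.List.pyRange 1 (pvIsqrt n + 1) 1).flatMap (pvDivChunk n) :=
        PySem.List.foldl_append_eq_flatMap _ _ _
    _ = _ := by simp

lemma sqrt_le_int (m : Int) (hm : 0 ≤ m) : pvIsqrt m * pvIsqrt m ≤ m := by
  have h := Nat.sqrt_le m.toNat
  simp only [pvIsqrt]
  have : ((m.toNat.sqrt * m.toNat.sqrt : Nat) : Int) ≤ ((m.toNat : Nat) : Int) := by exact_mod_cast h
  push_cast at this
  omega

lemma le_sqrt_int (m y : Int) (hm : 0 ≤ m) (hy : 0 ≤ y) (h : y * y ≤ m) : y ≤ pvIsqrt m := by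
  have h1 : y.toNat * y.toNat ≤ m.toNat := by
    have : ((y.toNat * y.toNat : Nat) : Int) ≤ ((m.toNat : Nat) : Int) := by
      push_cast
      rw [Int.toNat_of_nonneg hy, Int.toNat_of_nonneg hm]
      exact h
    exact_mod_cast this
  have := Nat.le_sqrt.mpr h1
  simp only [pvIsqrt]
  omega

lemma mem_chunk (n i f : Int) (hi : 0 < i) :
    f ∈ pvDivChunk n i ↔ i ∣ n ∧ (f = i ∨ f = PySem.Int.floordiv n i) := by
  unfold pvDivChunk
  simp only [PySem.Int.mod_eq_zero_iff_dvd]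
  split_ifs with h1 h2
  · simp [h1]
  · have h2' := not_ne_iff.mp h2
    simp [h1, ← h2']
  · simp [h1]

lemma fdiv_dvd (n i : Int) (hi : 0 < i) (h : i ∣ n) : PySem.Int.floordiv n i ∣ n := by
  rw [PySem.Int.floordiv_eq_ediv_of_pos hi]
  obtain ⟨c, rfl⟩ := h
  rw [Int.mul_ediv_cancel_left _ (by omega : i ≠ 0)]
  exact Dvd.intro_left i rfl

lemma mem_pvDivisors (m : Int) (hm : 0 ≤ m) (f : Int) :
    f ∈ pvDivisors m ↔ 1 ≤ f ∧ f ∣ m ∧ 1 ≤ m := by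
  rw [pvDivisors_eq, PySem.List.mem_sorted, List.mem_flatMap]
  constructor
  · rintro ⟨i, hir, hif⟩
    rw [PySem.List.mem_pyRange_one] at hir
    have hi : 0 < i := by omega
    have hn1 : 1 ≤ m := by
      by_contra h
      have hm0 : m = 0 := by omega
      subst hm0
      simp only [pvIsqrt, Int.toNat_zero, Nat.sqrt_zero, Nat.cast_zero] at hir
      omega
    rw [mem_chunk m i f hi] at hif
    obtain ⟨hdvd, hf⟩ := hif
    rcases hf with rfl | rfl
    · exact ⟨by omega, hdvd, hn1⟩
    · refine ⟨?_, fdiv_dvd m i hi hdvd, hn1⟩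
      rw [PySem.Int.floordiv_eq_ediv_of_pos hi]
      obtain ⟨c, rfl⟩ := hdvd
      rw [Int.mul_ediv_cancel_left _ (by omega : i ≠ 0)]
      nlinarith
  · rintro ⟨hf1, hdvd, hm1⟩
    obtain ⟨c, hcc⟩ := hdvd
    have hc1 : 1 ≤ c := by nlinarith
    by_cases hcase : f ≤ pvIsqrt m
    · refine ⟨f, ?_, ?_⟩
      · rw [PySem.List.mem_pyRange_one]; omega
      · rw [mem_chunk m f f (by omega)]
        exact ⟨⟨c, hcc⟩, Or.inl rfl⟩
    · rw [not_le] at hcase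
      have hsq := sqrt_le_int m hm
      have hff : m < f * f := by
        by_contra hcon
        rw [not_lt] at hcon
        have := le_sqrt_int m f hm (by omega) hcon
        omega
      have hcf : c < f := by nlinarith
      have hcle : c ≤ pvIsqrt m := le_sqrt_int m c hm (by omega) (by nlinarith)
      refine ⟨c, ?_, ?_⟩
      · rw [PySem.List.mem_pyRange_one]; omega
      · rw [mem_chunk m c f (by omega)]
        have hcd : c ∣ m := ⟨f, by linarith [hcc] ; ⟩
        refine ⟨⟨f, by rw [hcc]; ring⟩, Or.inr ?_⟩
        rw [PySem.Int.floordiv_eq_ediv_of_pos (by omega : (0:Int) < c), hcc,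
          show f * c = c * f by ring, Int.mul_ediv_cancel_left _ (by omega : c ≠ 0)]

lemma nodup_pvDivisors (m : Int) (hm : 0 ≤ m) : (pvDivisors m).Nodup := by
  rw [pvDivisors_eq]
  apply List.Nodup.perm ?_ (PySem.List.sorted_perm _ _ _).symm
  rw [List.nodup_flatMap]
  constructor
  · intro i hi
    unfold pvDivChunk
    split_ifs with h1 h2
    · simp [h2]
    · simp
    · simp
  · have hpl := PySem.List.pairwise_lt_pyRange_one (a := 1) (b := pvIsqrt m + 1)
    apply List.Pairwise.imp_of_mem ?_ hpl
    intro i j hi hj hij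
    rw [PySem.List.mem_pyRange_one] at hi hj
    have him : 0 < i := by omega
    have hjm : 0 < j := by omega
    intro e hei hej
    have hei' := (mem_chunk m i e him).mp hei
    have hej' := (mem_chunk m j e hjm).mp hej
    obtain ⟨hid, hie⟩ := hei'
    obtain ⟨hjd, hje⟩ := hej'
    have hsq := sqrt_le_int m hm
    have hdivi : PySem.Int.floordiv m i * i = m := by
      rw [PySem.Int.floordiv_eq_ediv_of_pos him]
      exact Int.ediv_mul_cancel hid
    have hdivj : PySem.Int.floordiv m j * j = m := by
      rw [PySem.Int.floordiv_eq_ediv_of_pos hjm]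
      exact Int.ediv_mul_cancel hjd
    rcases hie with rfl | rfl <;> rcases hje with h | h
    · omega
    · nlinarith [hdivj, hsq, hi.1, hj.1, hi.2, hj.2]
    · nlinarith [hdivi, hsq, hi.1, hj.1, hi.2, hj.2]
    · rw [← h] at hdivj
      have hm1 : 1 ≤ m := by nlinarith [hsq, hi.1, hi.2]
      nlinarith [hdivi, hdivj, hij, him, hjm, hm1]

lemma phip_cons (e : Int × Int) (Q : List (Int × Int)) : phip (e :: Q) = phik e.1 e.2 * phip Q := by
  simp [phip]

lemma pval_cons (e : Int × Int) (Q : List (Int × Int)) : pval (e :: Q) = pkpow e.1 e.2 * pval Q := by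
  simp [pval]

lemma phik_mono (p k k' : Int) (hp : 2 ≤ p) (hk : 1 ≤ k) (hkk : k ≤ k') :
    phik p k ≤ phik p k' := by
  unfold phik
  have : p ^ (k - 1).toNat ≤ p ^ (k' - 1).toNat :=
    pow_le_pow_right₀ (by omega : (1:Int) ≤ p) (by omega)
  nlinarith

lemma phik_succ (p k : Int) (hk : 1 ≤ k) : phik p (k + 1) = phik p k * p := by
  unfold phik
  have : (k + 1 - 1).toNat = (k - 1).toNat + 1 := by omega
  rw [this, pow_succ]
  ring

lemma pkpow_succ (p k : Int) (hk : 1 ≤ k) : pkpow p (k + 1) = pkpow p k * p := by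
  unfold pkpow
  have : (k + 1).toNat = k.toNat + 1 := by omega
  rw [this, pow_succ]

lemma EL_append (E : Int → List (List (Int × Int))) (x p : Int) :
    ∀ (t : Nat) (u k : Int) (res : List (List (Int × Int))), (x + 1 - u).toNat ≤ t →
      EL E x p u k res = res ++ EL E x p u k [] := by
  intro t
  induction t with
  | zero =>
    intro u k res h
    have hng : ¬(u ≤ x ∧ 1 ≤ u ∧ 2 ≤ p) := by rintro ⟨h1, h2, h3⟩; omega
    conv_lhs => rw [EL, dif_neg hng]
    conv_rhs => rw [EL, dif_neg hng]
    simp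
  | succ m ih =>
    intro u k res h
    by_cases hg : u ≤ x ∧ 1 ≤ u ∧ 2 ≤ p
    · conv_lhs => rw [EL, dif_pos hg]
      conv_rhs => rw [EL, dif_pos hg]
      have hup : u + 1 ≤ u * p := by nlinarith [hg.2.1, hg.2.2]
      have hm : (x + 1 - u * p).toNat ≤ m := by omega
      rw [ih (u * p) (k + 1) (if PySem.Int.mod x u = 0 then
          res ++ (E (PySem.Int.floordiv x u)).map (fun Q => (p, k) :: Q) else res) hm,
        ih (u * p) (k + 1) (if PySem.Int.mod x u = 0 then
          [] ++ (E (PySem.Int.floordiv x u)).map (fun Q => (p, k) :: Q) else []) hm]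
      split_ifs with hmod <;> simp
    · conv_lhs => rw [EL, dif_neg hg]
      conv_rhs => rw [EL, dif_neg hg]
      simp

-- pvRecLoop computes the values of the patterns EL produces

lemma RL_EL (E : Int → List (List (Int × Int))) (f : Int → List Int)
    (hf : ∀ y, f y = (E y).map pval) (x p : Int) :
    ∀ (t : Nat) (u k pk : Int) (res : List Int) (R : List (List (Int × Int))),
      (x + 1 - u).toNat ≤ t → 1 ≤ k → pk = pkpow p k → res = R.map pval →
      pvRecLoop f x p u pk res = (EL E x p u k R).map pval := by
  intro t
  induction t with
  | zero =>
    intro u k pk res R h hk hpk hres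
    have hng : ¬(u ≤ x ∧ 1 ≤ u ∧ 2 ≤ p) := by rintro ⟨h1, h2, h3⟩; omega
    conv_lhs => rw [pvRecLoop, dif_neg hng]
    conv_rhs => rw [EL, dif_neg hng]
    exact hres
  | succ m ih =>
    intro u k pk res R h hk hpk hres
    by_cases hg : u ≤ x ∧ 1 ≤ u ∧ 2 ≤ p
    · conv_lhs => rw [pvRecLoop, dif_pos hg]
      conv_rhs => rw [EL, dif_pos hg]
      have hup : u + 1 ≤ u * p := by nlinarith [hg.2.1, hg.2.2]
      apply ih (u * p) (k + 1) (pk * p) _ _ (by omega) (by omega)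
      · rw [hpk, pkpow_succ p k hk]
      · split_ifs with hmod
        · rw [hres, hf, List.map_append, List.map_map, List.map_map]
          congr 1
          apply List.map_congr_left
          intro Q _
          simp only [Function.comp_apply, pval_cons, hpk]
        · exact hres
    · conv_lhs => rw [pvRecLoop, dif_neg hg]
      conv_rhs => rw [EL, dif_neg hg]
      exact hres

lemma pvRec_eq_map_pval : ∀ (ps : List Int) (x : Int), pvRec ps x = (Epat ps x).map pval := by
  intro ps
  induction ps with
  | nil =>
    intro x
    unfold pvRec Epat
    split_ifs <;> simp [pval]
  | cons p rest ih =>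
    intro x
    show pvRecLoop (pvRec rest) x p (p - 1) p (pvRec rest x) = (EL (Epat rest) x p (p - 1) 1 (Epat rest x)).map pval
    apply RL_EL (Epat rest) (pvRec rest) ih x p ((x + 1 - (p - 1)).toNat) (p - 1) 1 p
        (pvRec rest x) (Epat rest x) le_rfl (by omega)
    · simp [pkpow]
    · exact ih x

-- membership in the EL loop

lemma mem_EL (E : Int → List (List (Int × Int))) (x p : Int) (hp : 2 ≤ p) (hx : 1 ≤ x) :
    ∀ (t : Nat) (u k : Int) (Q : List (Int × Int)), (x + 1 - u).toNat ≤ t → 1 ≤ k → u = phik p k →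
      (Q ∈ EL E x p u k [] ↔ ∃ k', k ≤ k' ∧ phik p k' ∣ x ∧
        ∃ Q', Q = (p, k') :: Q' ∧ Q' ∈ E (PySem.Int.floordiv x (phik p k'))) := by
  intro t
  induction t with
  | zero =>
    intro u k Q h hk hu
    have hupos : 1 ≤ u := hu ▸ phik_pos p k hp hk
    have hng : ¬(u ≤ x ∧ 1 ≤ u ∧ 2 ≤ p) := by rintro ⟨h1, h2, h3⟩; omega
    have hux : ¬(u ≤ x) := by omega
    rw [show EL E x p u k [] = [] by rw [EL, dif_neg hng]]
    simp only [List.not_mem_nil, false_iff]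
    rintro ⟨k', hkk', hdvd, Q', rfl, hQ'⟩
    have h1 : phik p k ≤ phik p k' := phik_mono p k k' hp hk hkk'
    have h2 : phik p k' ≤ x := Int.le_of_dvd (by omega) hdvd
    omega
  | succ m ih =>
    intro u k Q h hk hu
    by_cases hg : u ≤ x ∧ 1 ≤ u ∧ 2 ≤ p
    · rw [show EL E x p u k [] = EL E x p (u*p) (k+1)
          (if PySem.Int.mod x u = 0 then [] ++ (E (PySem.Int.floordiv x u)).map (fun Q => (p, k) :: Q) else [])
          by conv_lhs => rw [EL, dif_pos hg]]
      have hup : u + 1 ≤ u * p := by nlinarith [hg.2.1, hg.2.2]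
      rw [EL_append E x p m (u * p) (k + 1) _ (by omega)]
      rw [List.mem_append]
      rw [ih (u * p) (k + 1) Q (by omega) (by omega) (by rw [hu, phik_succ p k hk])]
      constructor
      · rintro (hin | ⟨k', hkk', hdvd, Q', rfl, hQ'⟩)
        · -- from the k-contribution (only when u ∣ x)
          split_ifs at hin with hmod
          · simp only [List.nil_append, List.mem_map] at hin
            obtain ⟨Q', hQ', rfl⟩ := hin
            exact ⟨k, le_rfl, hu ▸ (PySem.Int.mod_eq_zero_iff_dvd x u).mp hmod, Q', rfl, hu ▸ hQ'⟩
          · simp at hin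
        · exact ⟨k', by omega, hdvd, Q', rfl, hQ'⟩
      · rintro ⟨k', hkk', hdvd, Q', rfl, hQ'⟩
        by_cases hk'k : k' = k
        · subst hk'k
          left
          have hmod : PySem.Int.mod x u = 0 := (PySem.Int.mod_eq_zero_iff_dvd x u).mpr (hu ▸ hdvd)
          rw [if_pos hmod]
          simp only [List.nil_append, List.mem_map]
          exact ⟨Q', hu ▸ hQ', rfl⟩
        · right
          exact ⟨k', by omega, hdvd, Q', rfl, hQ'⟩
    · rw [show EL E x p u k [] = [] by rw [EL, dif_neg hg]]
      have hupos : 1 ≤ u := hu ▸ phik_pos p k hp hk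
      have hux : ¬(u ≤ x) := by intro hle; exact hg ⟨hle, hupos, hp⟩
      simp only [List.not_mem_nil, false_iff]
      rintro ⟨k', hkk', hdvd, Q', rfl, hQ'⟩
      have h1 : phik p k ≤ phik p k' := phik_mono p k k' hp hk hkk'
      have h2 : phik p k' ≤ x := Int.le_of_dvd (by omega) hdvd
      omega

lemma mem_Epat (ps : List Int) (hps : ∀ p ∈ ps, 2 ≤ p) :
    ∀ (x : Int), 1 ≤ x → ∀ (Q : List (Int × Int)),
    (Q ∈ Epat ps x ↔ (Q.map Prod.fst).Sublist ps ∧ (∀ e ∈ Q, 1 ≤ e.2) ∧ phip Q = x) := by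
  induction ps with
  | nil =>
    intro x hx Q
    unfold Epat
    constructor
    · intro hQ
      split_ifs at hQ with h1
      · simp at hQ
        subst hQ
        simp [phip, h1]
      · simp at hQ
    · rintro ⟨hsub, _, hphi⟩
      have : Q = [] := by
        cases Q with
        | nil => rfl
        | cons e S => simp at hsub
      subst this
      simp [phip] at hphi
      simp [← hphi]
  | cons p rest ih =>
    intro x hx Q
    have hp : 2 ≤ p := hps p (by simp)
    have hrest : ∀ q ∈ rest, 2 ≤ q := fun q hq => hps q (by simp [hq])
    show Q ∈ EL (Epat rest) x p (p - 1) 1 (Epat rest x) ↔ _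
    rw [EL_append (Epat rest) x p (x + 1 - (p-1)).toNat (p - 1) 1 _ le_rfl, List.mem_append]
    rw [mem_EL (Epat rest) x p hp hx ((x + 1 - (p-1)).toNat) (p - 1) 1 Q le_rfl (by omega)
        (by simp [phik])]
    constructor
    · rintro (hin | ⟨k', hk', hdvd, Q', rfl, hQ'⟩)
      · obtain ⟨hsub, hks, hphi⟩ := (ih hrest x hx Q).mp hin
        exact ⟨hsub.trans (List.sublist_cons_self p rest), hks, hphi⟩
      · have hu1 : 1 ≤ phik p k' := phik_pos p k' hp (by omega)
        have hxq : PySem.Int.floordiv x (phik p k') = x / phik p k' :=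
          PySem.Int.floordiv_eq_ediv_of_pos (by omega)
        have hx' : 1 ≤ x / phik p k' := by
          obtain ⟨c, rfl⟩ := hdvd
          rw [Int.mul_ediv_cancel_left _ (by omega : phik p k' ≠ 0)]
          nlinarith
        rw [hxq] at hQ'
        obtain ⟨hsub, hks, hphi⟩ := (ih hrest _ hx' Q').mp hQ'
        refine ⟨?_, ?_, ?_⟩
        · simp only [List.map_cons]
          exact List.cons_sublist_cons.mpr hsub
        · intro e he
          rcases List.mem_cons.mp he with rfl | hmem
          · simpa using by omega
          · exact hks e hmem
        · rw [phip_cons, hphi]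
          simp only
          exact Int.mul_ediv_cancel' hdvd
    · rintro ⟨hsub, hks, hphi⟩
      rcases List.sublist_cons_iff.mp hsub with hsub' | ⟨l', hl', hsub'⟩
      · left
        exact (ih hrest x hx Q).mpr ⟨hsub', hks, hphi⟩
      · -- Q starts with (p, k)
        cases Q with
        | nil => simp at hl'
        | cons e Q' =>
          simp only [List.map_cons, List.cons.injEq] at hl'
          obtain ⟨hep, hl'⟩ := hl'
          right
          have hk1 : 1 ≤ e.2 := hks e (by simp)
          have hQ'pos : ∀ e' ∈ Q', 2 ≤ e'.1 ∧ 1 ≤ e'.2 := by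
            intro e' he'
            constructor
            · have hs2 : (List.map Prod.fst Q').Sublist rest := by rw [hl']; exact hsub'
              exact hrest _ (hs2.subset (List.mem_map_of_mem he'))
            · exact hks e' (by simp [he'])
          have hphipos : 1 ≤ phip Q' := phip_pos Q' hQ'pos
          have hphi' : phik p e.2 * phip Q' = x := by
            rw [← hphi, phip_cons, hep]
          have hdvd : phik p e.2 ∣ x := ⟨phip Q', hphi'.symm⟩
          refine ⟨e.2, hk1, hdvd, Q', ?_, ?_⟩
          · rw [← hep]
          · have hxq : PySem.Int.floordiv x (phik p e.2) = phip Q' := by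
              rw [PySem.Int.floordiv_eq_ediv_of_pos (by have := phik_pos p e.2 hp hk1; omega)]
              rw [← hphi']
              rw [Int.mul_ediv_cancel_left _ (by have := phik_pos p e.2 hp hk1; omega)]
            rw [hxq]
            exact (ih hrest (phip Q') hphipos Q').mpr ⟨by rw [hl']; exact hsub', fun e' he' => (hQ'pos e' he').2, rfl⟩

lemma EL_stop (E : Int → List (List (Int × Int))) (x p u k : Int)
    (res : List (List (Int × Int))) (hx : x ≤ 0) : EL E x p u k res = res := by
  rw [EL, dif_neg]
  rintro ⟨h1, h2, h3⟩
  omega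

lemma Epat_nonpos : ∀ (ps : List Int) (x : Int), x ≤ 0 → Epat ps x = [] := by
  intro ps
  induction ps with
  | nil => intro x hx; unfold Epat; rw [if_neg (by omega)]
  | cons p rest ih =>
    intro x hx
    show EL (Epat rest) x p (p - 1) 1 (Epat rest x) = []
    rw [EL_stop _ _ _ _ _ _ hx, ih x hx]

lemma nodup_EL (E : Int → List (List (Int × Int))) (x p : Int) (hp : 2 ≤ p) (hx : 1 ≤ x)
    (hE : ∀ y, (E y).Nodup) :
    ∀ (t : Nat) (u k : Int), (x + 1 - u).toNat ≤ t → 1 ≤ k → u = phik p k →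
      (EL E x p u k []).Nodup := by
  intro t
  induction t with
  | zero =>
    intro u k h hk hu
    have hupos : 1 ≤ u := hu ▸ phik_pos p k hp hk
    have hng : ¬(u ≤ x ∧ 1 ≤ u ∧ 2 ≤ p) := by rintro ⟨h1, h2, h3⟩; omega
    rw [EL, dif_neg hng]
    simp
  | succ m ih =>
    intro u k h hk hu
    by_cases hg : u ≤ x ∧ 1 ≤ u ∧ 2 ≤ p
    · rw [show EL E x p u k [] = EL E x p (u*p) (k+1)
          (if PySem.Int.mod x u = 0 then [] ++ (E (PySem.Int.floordiv x u)).map (fun Q => (p, k) :: Q) else [])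
          by conv_lhs => rw [EL, dif_pos hg]]
      have hup : u + 1 ≤ u * p := by nlinarith [hg.2.1, hg.2.2]
      have hu' : u * p = phik p (k + 1) := by rw [hu, phik_succ p k hk]
      rw [EL_append E x p m (u * p) (k + 1) _ (by omega)]
      rw [List.nodup_append]
      refine ⟨?_, ih (u * p) (k + 1) (by omega) (by omega) hu', ?_⟩
      · split_ifs with hmod
        · simp only [List.nil_append]
          exact (hE _).map (fun Q1 Q2 hQ => by simpa using hQ)
        · simp
      · intro Q hQ1 Q2 hQ2
        rw [mem_EL E x p hp hx ((x + 1 - u*p).toNat) (u*p) (k+1) Q2 le_rfl (by omega) hu'] at hQ2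
        obtain ⟨k', hk', _, Q', rfl, _⟩ := hQ2
        split_ifs at hQ1 with hmod
        · simp only [List.nil_append, List.mem_map] at hQ1
          obtain ⟨Q'', _, rfl⟩ := hQ1
          intro hcon
          simp only [List.cons.injEq, Prod.mk.injEq] at hcon
          omega
        · simp at hQ1
    · rw [EL, dif_neg hg]
      simp

lemma nodup_Epat : ∀ (ps : List Int), ps.Nodup → (∀ p ∈ ps, 2 ≤ p) → ∀ (x : Int),
    (Epat ps x).Nodup := by
  intro ps
  induction ps with
  | nil =>
    intro _ _ x
    unfold Epat
    split_ifs <;> simp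
  | cons p rest ih =>
    intro hnd hps x
    have hp : 2 ≤ p := hps p (by simp)
    have hrest : ∀ q ∈ rest, 2 ≤ q := fun q hq => hps q (by simp [hq])
    have hndr : rest.Nodup := (List.nodup_cons.mp hnd).2
    have hpnr : p ∉ rest := (List.nodup_cons.mp hnd).1
    by_cases hx : 1 ≤ x
    case neg =>
      rw [Epat_nonpos (p :: rest) x (by omega)]
      simp
    show (EL (Epat rest) x p (p - 1) 1 (Epat rest x)).Nodup
    rw [EL_append (Epat rest) x p (x + 1 - (p-1)).toNat (p - 1) 1 _ le_rfl]
    rw [List.nodup_append]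
    refine ⟨ih hndr hrest x, ?_, ?_⟩
    · exact nodup_EL (Epat rest) x p hp hx (fun y => ih hndr hrest y)
        ((x + 1 - (p-1)).toNat) (p - 1) 1 le_rfl (by omega) (by simp [phik])
    · intro Q hQ1 Q2 hQ2
      rw [mem_EL (Epat rest) x p hp hx ((x + 1 - (p-1)).toNat) (p - 1) 1 Q2 le_rfl (by omega)
          (by simp [phik])] at hQ2
      obtain ⟨k', _, _, Q', rfl, _⟩ := hQ2
      obtain ⟨hsub, _, _⟩ := (mem_Epat rest hrest x hx _).mp hQ1
      intro hcon
      subst hcon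
      simp only [List.map_cons] at hsub
      exact hpnr (hsub.subset (by simp))

lemma AOK_nil (n : Int) : AOK n [] := by simp [AOK, AOKr]

lemma AOK_snoc (n : Int) (Q : List (Int × Int)) (q k : Int) :
    AOK n (Q ++ [(q, k)]) ↔ (1 ≤ k ∧ k ≤ pvValuation n q + 1 ∧
      1 ≤ phip Q ∧ phip Q ∣ PySem.Int.floordiv n (phik q k) ∧
      1 ≤ PySem.Int.floordiv n (phik q k) ∧ AOK n Q) := by
  unfold AOK
  rw [List.reverse_append]
  simp only [List.reverse_cons, List.reverse_nil, List.nil_append, List.singleton_append]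
  show AOKr n ((q, k) :: Q.reverse) ↔ _
  rw [AOKr]
  simp [List.reverse_reverse]

lemma mem_pairsP (n p : Int) (hn : 1 ≤ n) (hp : 2 ≤ p) (kf : Int × Int) :
    kf ∈ pairsP n p ↔ 1 ≤ kf.1 ∧ kf.1 ≤ pvValuation n p + 1 ∧ 1 ≤ kf.2 ∧
      kf.2 ∣ PySem.Int.floordiv n (phik p kf.1) ∧ 1 ≤ PySem.Int.floordiv n (phik p kf.1) := by
  unfold pairsP
  rw [List.mem_flatMap]
  constructor
  · rintro ⟨k, hk, hf⟩
    rw [PySem.List.mem_pyRange_one] at hk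
    rw [List.mem_map] at hf
    obtain ⟨f, hf, rfl⟩ := hf
    have hk1 : 1 ≤ k := hk.1
    have hdnn : 0 ≤ PySem.Int.floordiv n (phik p k) := by
      rw [PySem.Int.floordiv_eq_ediv_of_pos (by have := phik_pos p k hp hk1; omega)]
      exact Int.ediv_nonneg (by omega) (by have := phik_pos p k hp hk1; omega)
    rw [mem_pvDivisors _ hdnn] at hf
    exact ⟨hk1, by omega, hf.1, hf.2.1, hf.2.2⟩
  · rintro ⟨h1, h2, h3, h4, h5⟩
    refine ⟨kf.1, ?_, ?_⟩
    · rw [PySem.List.mem_pyRange_one]; omega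
    · rw [List.mem_map]
      refine ⟨kf.2, ?_, rfl⟩
      have hdnn : 0 ≤ PySem.Int.floordiv n (phik p kf.1) := by omega
      rw [mem_pvDivisors _ hdnn]
      exact ⟨h3, h4, h5⟩

lemma nodup_pairsP (n p : Int) (hn : 1 ≤ n) (hp : 2 ≤ p) : (pairsP n p).Nodup := by
  unfold pairsP
  rw [List.nodup_flatMap]
  constructor
  · intro k hk
    rw [PySem.List.mem_pyRange_one] at hk
    have hk1 : 1 ≤ k := hk.1
    apply List.Nodup.map
    · intro a b hab
      simpa using hab
    · apply nodup_pvDivisors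
      rw [PySem.Int.floordiv_eq_ediv_of_pos (by have := phik_pos p k hp hk1; omega)]
      exact Int.ediv_nonneg (by omega) (by have := phik_pos p k hp hk1; omega)
  · apply List.Pairwise.imp_of_mem ?_ (PySem.List.pairwise_lt_pyRange_one (a := 1) (b := pvValuation n p + 1 + 1))
    intro k1 k2 _ _ h12
    intro a ha hb
    rw [List.mem_map] at ha hb
    obtain ⟨f1, _, rfl⟩ := ha
    obtain ⟨f2, _, h⟩ := hb
    simp only [Prod.mk.injEq] at h
    omega

-- snoc decomposition of a map-fst equation

lemma snoc_of_map_fst (Q : List (Int × Int)) (l1 : List Int) (q : Int)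
    (h : Q.map Prod.fst = l1 ++ [q]) :
    ∃ Q' k, Q = Q' ++ [(q, k)] ∧ Q'.map Prod.fst = l1 := by
  rcases List.eq_nil_or_concat Q with rfl | ⟨Q', e, rfl⟩
  · simp at h
  · rw [List.concat_eq_append] at h ⊢
    rw [List.map_append] at h
    simp only [List.map_cons, List.map_nil] at h
    have h2 := List.append_inj' h rfl
    obtain ⟨h3, h4⟩ := h2
    simp only [List.cons.injEq] at h4
    exact ⟨Q', e.2, by rw [← h4.1], h3⟩

lemma mem_Gfold (n : Int) (hn : 1 ≤ n) :
    ∀ (ps : List Int), (∀ p ∈ ps, 2 ≤ p) → ∀ (x : Int) (Q : List (Int × Int)),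
      (Q ∈ (ps.foldl (AStepP n) sigma0) x ↔
        (Q.map Prod.fst).Sublist ps ∧ phip Q = x ∧ AOK n Q) := by
  intro ps
  induction ps using List.reverseRecOn with
  | nil =>
    intro _ x Q
    simp only [List.foldl_nil, sigma0]
    constructor
    · intro h
      split_ifs at h with h1
      · simp at h
        subst h
        simp [phip, h1, AOK_nil]
      · simp at h
    · rintro ⟨hsub, hphi, _⟩
      have : Q = [] := by
        cases Q with
        | nil => rfl
        | cons e S => simp at hsub
      subst this
      simp [phip] at hphi
      simp [← hphi]
  | append_singleton ps q ih =>
    intro hps x Q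
    have hq : 2 ≤ q := hps q (by simp)
    have hpps : ∀ p ∈ ps, 2 ≤ p := fun p hp => hps p (by simp [hp])
    rw [List.foldl_append, List.foldl_cons, List.foldl_nil]
    show Q ∈ AStepP n (ps.foldl (AStepP n) sigma0) q x ↔ _
    unfold AStepP
    rw [List.mem_append, List.mem_flatMap]
    constructor
    · rintro (hin | ⟨kf, hkf, hmem⟩)
      · obtain ⟨hsub, hphi, hok⟩ := (ih hpps x Q).mp hin
        exact ⟨hsub.trans (by simp), hphi, hok⟩
      · rw [List.mem_filter] at hkf
        obtain ⟨hpair, hcond⟩ := hkf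
        simp only [Bool.and_eq_true, beq_iff_eq] at hcond
        obtain ⟨hne, hkey⟩ := hcond
        rw [List.mem_map] at hmem
        obtain ⟨Q', hQ', rfl⟩ := hmem
        rw [mem_pairsP n q hn hq] at hpair
        obtain ⟨hk1, hk2, hf1, hfd, hfd1⟩ := hpair
        obtain ⟨hsub', hphi', hok'⟩ := (ih hpps kf.2 Q').mp hQ'
        refine ⟨?_, ?_, ?_⟩
        · rw [List.map_append]
          simp only [List.map_cons, List.map_nil]
          exact List.Sublist.append hsub' (List.Sublist.refl _)
        · rw [phip_append, hphi']
          simp only [phip, List.map_cons, List.map_nil, List.prod_cons, List.prod_nil, mul_one]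
          rw [← hkey]
        · rw [AOK_snoc]
          exact ⟨hk1, hk2, by omega, hphi' ▸ hfd, hfd1, hok'⟩
    · rintro ⟨hsub, hphi, hok⟩
      rcases List.sublist_append_iff.mp hsub with ⟨l1, l2, heq, hsub1, hsub2⟩
      rcases List.sublist_singleton.mp hsub2 with rfl | rfl
      · left
        rw [List.append_nil] at heq
        exact (ih hpps x Q).mpr ⟨heq ▸ hsub1, hphi, hok⟩
      · right
        obtain ⟨Q', k, rfl, hmf⟩ := snoc_of_map_fst Q l1 q heq
        rw [AOK_snoc] at hok
        obtain ⟨hk1, hk2, hphip1, hphid, hfd1, hok'⟩ := hok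
        have hQ'mem : Q' ∈ (ps.foldl (AStepP n) sigma0) (phip Q') :=
          (ih hpps (phip Q') Q').mpr ⟨hmf ▸ hsub1, rfl, hok'⟩
        refine ⟨(k, phip Q'), ?_, ?_⟩
        · rw [List.mem_filter]
          constructor
          · rw [mem_pairsP n q hn hq]
            exact ⟨hk1, hk2, hphip1, hphid, hfd1⟩
          · simp only [Bool.and_eq_true, beq_iff_eq]
            constructor
            · have hne2 : (List.foldl (AStepP n) sigma0 ps (phip Q')) ≠ [] := by
                intro hemp
                rw [hemp] at hQ'mem
                simp at hQ'mem
              simp only [Bool.not_eq_true', List.isEmpty_eq_false_iff]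
              exact hne2
            · rw [← hphi, phip_append]
              simp [phip, mul_comm]
        · rw [List.mem_map]
          exact ⟨Q', hQ'mem, rfl⟩

lemma nodup_Gfold (n : Int) (hn : 1 ≤ n) :
    ∀ (ps : List Int), ps.Nodup → (∀ p ∈ ps, 2 ≤ p) → ∀ (x : Int),
      ((ps.foldl (AStepP n) sigma0) x).Nodup := by
  intro ps
  induction ps using List.reverseRecOn with
  | nil =>
    intro _ _ x
    simp only [List.foldl_nil, sigma0]
    split_ifs <;> simp
  | append_singleton ps q ih =>
    intro hnd hps x
    have hq : 2 ≤ q := hps q (by simp)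
    have hpps : ∀ p ∈ ps, 2 ≤ p := fun p hp => hps p (by simp [hp])
    have hndp : ps.Nodup := (List.nodup_append.mp hnd).1
    have hqni : q ∉ ps := by
      intro hcon
      have := (List.nodup_append.mp hnd).2.2
      exact this q hcon q (by simp) rfl
    rw [List.foldl_append, List.foldl_cons, List.foldl_nil]
    show (AStepP n (ps.foldl (AStepP n) sigma0) q x).Nodup
    unfold AStepP
    rw [List.nodup_append]
    refine ⟨ih hndp hpps x, ?_, ?_⟩
    · rw [List.nodup_flatMap]
      constructor
      · intro kf hkf
        apply List.Nodup.map
        · intro a b hab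
          simpa using hab
        · exact ih hndp hpps kf.2
      · apply List.Pairwise.filter
        apply List.Pairwise.imp_of_mem ?_ ((nodup_pairsP n q hn hq).imp (fun h => h))
        intro kf1 kf2 h1 h2 hne
        intro Q hQ1 hQ2
        rw [List.mem_map] at hQ1 hQ2
        obtain ⟨Q1, hQ1m, rfl⟩ := hQ1
        obtain ⟨Q2, hQ2m, heq⟩ := hQ2
        have hinj := List.append_inj' heq.symm rfl
        obtain ⟨hQQeq, hkeq⟩ := hinj
        simp only [List.cons.injEq, Prod.mk.injEq] at hkeq
        obtain ⟨⟨_, hk12⟩, _⟩ := hkeq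
        have hp1 := (mem_Gfold n hn ps hpps kf1.2 Q1).mp hQ1m
        have hp2 := (mem_Gfold n hn ps hpps kf2.2 Q2).mp hQ2m
        apply hne
        have : kf1.2 = kf2.2 := by
          rw [← hp1.2.1, ← hp2.2.1, hQQeq]
        exact Prod.ext (by omega) this
    · intro Q hQ1 Q2 hQ2
      rw [List.mem_flatMap] at hQ2
      obtain ⟨kf, _, hQ2m⟩ := hQ2
      rw [List.mem_map] at hQ2m
      obtain ⟨Q', _, rfl⟩ := hQ2m
      obtain ⟨hsub, _, _⟩ := (mem_Gfold n hn ps hpps x Q).mp hQ1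
      intro hcon
      subst hcon
      apply hqni
      apply hsub.subset
      rw [List.map_append]
      simp

lemma dvd_AOK (n : Int) (hn : 1 ≤ n) :
    ∀ (Q : List (Int × Int)), (∀ e ∈ Q, 2 ≤ e.1 ∧ 1 ≤ e.2) → phip Q ∣ n → AOK n Q := by
  intro Q
  induction Q using List.reverseRecOn with
  | nil => intro _ _; exact AOK_nil n
  | append_singleton Q' e ih =>
    intro hel hdvd
    rw [phip_append] at hdvd
    simp only [phip, List.map_cons, List.map_nil, List.prod_cons, List.prod_nil, mul_one] at hdvd
    have he := hel e (by simp)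
    have hu1 : 1 ≤ phik e.1 e.2 := phik_pos e.1 e.2 he.1 he.2
    have hf1 : 1 ≤ phip Q' := phip_pos Q' (fun a ha => hel a (by simp [ha]))
    have hudvd : phik e.1 e.2 ∣ n := (Dvd.intro_left _ rfl).trans hdvd
    obtain ⟨c, hc⟩ := hudvd
    have hfdiv : PySem.Int.floordiv n (phik e.1 e.2) = c := by
      rw [PySem.Int.floordiv_eq_ediv_of_pos (by omega), hc,
        Int.mul_ediv_cancel_left _ (by omega : phik e.1 e.2 ≠ 0)]
    have hc1 : 1 ≤ c := by nlinarith
    have hfc : phip Q' ∣ c := by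
      have h2 : phip Q' * phik e.1 e.2 ∣ phik e.1 e.2 * c := hc ▸ hdvd
      rw [mul_comm (phip Q') _] at h2
      exact (mul_dvd_mul_iff_left (by omega : phik e.1 e.2 ≠ 0)).mp h2
    have hkval : e.2 ≤ pvValuation n e.1 + 1 := by
      have hpow : (e.1 ^ (e.2 - 1).toNat : Int) ∣ n := by
        have : (e.1 ^ (e.2 - 1).toNat : Int) ∣ phik e.1 e.2 := Dvd.intro_left _ rfl
        exact this.trans (hc ▸ Dvd.intro c rfl)
      have := le_pvValuation n e.1 hn he.1 (e.2 - 1).toNat hpow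
      omega
    have hsplit : Q' ++ [e] = Q' ++ [(e.1, e.2)] := by simp
    rw [hsplit, AOK_snoc]
    refine ⟨he.2, hkval, hf1, ?_, by omega, ih (fun a ha => hel a (by simp [ha])) ((Dvd.intro _ rfl).trans hdvd)⟩
    rw [hfdiv]
    exact hfc

lemma pval_snoc (Q : List (Int × Int)) (p k : Int) :
    pval (Q ++ [(p, k)]) = pkpow p k * pval Q := by
  simp [pval, mul_comm]

-- generic: getD after a modify-append fold

lemma foldl_modify_getD {α : Type} (L : List α) (key : α → Int) (ch : α → List Int)
    (t : PySem.Dict Int (List Int)) (x : Int) :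
    (L.foldl (fun t a => t.modify (key a) [] (fun l => l ++ ch a)) t).getD x []
      = t.getD x [] ++ (L.filter (fun a => key a == x)).flatMap ch := by
  induction L generalizing t with
  | nil => simp
  | cons a L ih =>
    rw [List.foldl_cons, ih]
    rw [PySem.Dict.getD_modify]
    by_cases hx : key a = x
    · rw [if_pos (by omega), List.filter_cons_of_pos (by simpa using hx), List.flatMap_cons,
        ← List.append_assoc, hx]
    · rw [if_neg (by omega), List.filter_cons_of_neg (by simpa using hx)]

lemma foldl_modify_contains {α : Type} (L : List α) (key : α → Int) (ch : α → List Int)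
    (t : PySem.Dict Int (List Int)) (x : Int) :
    (L.foldl (fun t a => t.modify (key a) [] (fun l => l ++ ch a)) t).contains x
      = (t.contains x || L.any (fun a => key a == x)) := by
  induction L generalizing t with
  | nil => simp
  | cons a L ih =>
    rw [List.foldl_cons, ih, PySem.Dict.contains_modify, List.any_cons]
    by_cases hx : x = key a
    · simp [hx]
    · have : (x == key a) = false := by simpa using hx
      have h2 : (key a == x) = false := by simpa using (Ne.symm hx)
      rw [this, h2]
      simp

lemma filter_beq_of_nodup (l : List Int) (h : l.Nodup) (x : Int) :
    l.filter (fun k => k == x) = if x ∈ l then [x] else [] := by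
  induction l with
  | nil => simp
  | cons a l ih =>
    obtain ⟨hna, hnd⟩ := List.nodup_cons.mp h
    by_cases hax : a = x
    · subst hax
      rw [List.filter_cons_of_pos (by simp), ih hnd, if_neg hna, if_pos (by simp)]
    · rw [List.filter_cons_of_neg (by simpa using hax), ih hnd]
      have : (x ∈ a :: l) ↔ x ∈ l := by simp [Ne.symm hax]
      by_cases hxl : x ∈ l
      · rw [if_pos hxl, if_pos (this.mpr hxl)]
      · rw [if_neg hxl, if_neg (fun hc => hxl (this.mp hc))]

lemma items_foldl_getD (d : PySem.Dict Int (List Int)) (hnd : d.keys.Nodup)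
    (r : PySem.Dict Int (List Int)) (x : Int) :
    (d.items.foldl (fun r iv => r.modify iv.1 [] (fun l => l ++ iv.2)) r).getD x []
      = r.getD x [] ++ d.getD x [] := by
  rw [foldl_modify_getD d.items (fun iv => iv.1) (fun iv => iv.2) r x]
  congr 1
  rw [PySem.Dict.items_eq_map_keys d hnd []]
  rw [List.filter_map, List.flatMap_map]
  have : ((fun a => (fun iv => iv.1) a == x) ∘ (fun k => (k, d.getD k []))) = (fun k => k == x) := rfl
  rw [this, filter_beq_of_nodup d.keys hnd x]
  by_cases hx : x ∈ d.keys
  · rw [if_pos hx]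
    simp
  · rw [if_neg hx]
    have hc : d.contains x = false := by
      rcases Bool.eq_false_or_eq_true (d.contains x) with h | h
      · exact absurd ((PySem.Dict.contains_iff_mem_keys d x).mp h) hx
      · exact h
    rw [PySem.Dict.getD_of_not_contains d [] hc]
    simp

lemma items_foldl_contains (d : PySem.Dict Int (List Int)) (hnd : d.keys.Nodup)
    (r : PySem.Dict Int (List Int)) (x : Int) :
    (d.items.foldl (fun r iv => r.modify iv.1 [] (fun l => l ++ iv.2)) r).contains x
      = (r.contains x || d.contains x) := by
  rw [foldl_modify_contains d.items (fun iv => iv.1) (fun iv => iv.2) r x]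
  suffices hsuf : d.items.any (fun iv => iv.1 == x) = d.contains x by rw [hsuf]
  rw [PySem.Dict.items_eq_map_keys d hnd [], List.any_map]
  show d.keys.any (fun k => k == x) = d.contains x
  rcases Bool.eq_false_or_eq_true (d.contains x) with h | h
  · rw [h, List.any_eq_true]
    exact ⟨x, (PySem.Dict.contains_iff_mem_keys d x).mp h, by simp⟩
  · rw [h]
    rw [List.any_eq_false]
    intro k hk
    simp only [beq_iff_eq]
    intro hkx
    subst hkx
    exact absurd ((PySem.Dict.contains_iff_mem_keys d k).mpr hk) (by simp [h])

lemma flatMap_eq_nil_iff_filtered {α : Type} (L : List α) (g : α → List (List (Int × Int)))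
    (h : ∀ a ∈ L, g a ≠ []) : (L.flatMap g).isEmpty = L.isEmpty := by
  cases L with
  | nil => simp
  | cons a L =>
    have := h a (by simp)
    rw [List.flatMap_cons]
    rcases List.exists_cons_of_ne_nil this with ⟨b, t, hbt⟩
    simp [hbt]

lemma any_eq_not_isEmpty_filter {α : Type} (l : List α) (p : α → Bool) :
    l.any p = !(l.filter p).isEmpty := by
  cases h : l.any p
  · rw [List.any_eq_false] at h
    have : l.filter p = [] := List.filter_eq_nil_iff.mpr h
    simp [this]
  · rw [List.any_eq_true] at h
    obtain ⟨a, ha, hpa⟩ := h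
    have : a ∈ l.filter p := List.mem_filter.mpr ⟨ha, hpa⟩
    rcases List.exists_cons_of_ne_nil (List.ne_nil_of_mem this) with ⟨b, t, hbt⟩
    simp [hbt]

lemma step_INV (n : Int) (d : Int) (r : PySem.Dict Int (List Int))
    (σ : Int → List (List (Int × Int)))
    (h1 : ∀ x, r.getD x [] = (σ x).map pval)
    (h2 : ∀ x, r.contains x = !(σ x).isEmpty)
    (h3 : r.keys.Nodup) :
    (∀ x, (cbody n r d).getD x [] = ((abody n σ d) x).map pval) ∧
    (∀ x, (cbody n r d).contains x = !((abody n σ d) x).isEmpty) ∧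
    (cbody n r d).keys.Nodup := by
  unfold cbody abody
  by_cases hp : pvIsPrime (d + 1)
  case neg => rw [if_neg hp, if_neg hp]; exact ⟨h1, h2, h3⟩
  rw [if_pos hp, if_pos hp]
  -- the temp dict as a fold over the (k, f) pair list
  have hphik : ∀ k : Int, phik (d + 1) k = d * (d + 1) ^ (k - 1).toNat := by
    intro k; simp [phik]
  have htemp :
      ((PySem.List.pyRange 1 (pvValuation n (d + 1) + 1 + 1) 1).foldl (fun temp k =>
          (pvDivisors (PySem.Int.floordiv n (d * (d + 1) ^ (k - 1).toNat))).foldl (fun temp f =>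
            if r.contains f then
              temp.modify (f * (d * (d + 1) ^ (k - 1).toNat)) []
                (fun l => l ++ (r.getD f []).map (fun x => (d + 1) ^ k.toNat * x))
            else temp) temp) (PySem.Dict.empty : PySem.Dict Int (List Int)))
      = ((pairsP n (d + 1)).filter (fun kf => r.contains kf.2)).foldl (fun temp kf =>
          temp.modify (kf.2 * (d * (d + 1) ^ (kf.1 - 1).toNat)) []
            (fun l => l ++ (r.getD kf.2 []).map (fun x => (d + 1) ^ kf.1.toNat * x))) PySem.Dict.empty := by
    calc _ = (pairsP n (d + 1)).foldl (fun temp kf =>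
            if r.contains kf.2 then
              temp.modify (kf.2 * (d * (d + 1) ^ (kf.1 - 1).toNat)) []
                (fun l => l ++ (r.getD kf.2 []).map (fun y => (d + 1) ^ kf.1.toNat * y))
            else temp) PySem.Dict.empty := by
          unfold pairsP
          simp only [hphik]
          rw [List.foldl_flatMap]
          apply PySem.List.foldl_congr_mem
          intro acc k _
          rw [List.foldl_map]
      _ = _ := by rw [PySem.List.foldl_if_eq_foldl_filter]
  -- abstract contribution list
  set contrib : Int → List (List (Int × Int)) := fun x =>
    ((pairsP n (d + 1)).filter (fun kf => !(σ kf.2).isEmpty && (kf.2 * phik (d + 1) kf.1 == x))).flatMap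
      (fun kf => (σ kf.2).map (fun Q => Q ++ [(d + 1, kf.1)])) with hcontrib
  have hfiltcong : ∀ x : Int,
      ((pairsP n (d + 1)).filter (fun kf => r.contains kf.2)).filter
          (fun kf => kf.2 * (d * (d + 1) ^ (kf.1 - 1).toNat) == x)
        = (pairsP n (d + 1)).filter (fun kf => !(σ kf.2).isEmpty && (kf.2 * phik (d + 1) kf.1 == x)) := by
    intro x
    rw [List.filter_filter]
    apply List.filter_congr
    intro kf _
    rw [h2 kf.2, hphik kf.1]
    rw [Bool.and_comm]
  have hchunk : ∀ kf : Int × Int,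
      (r.getD kf.2 []).map (fun y => (d + 1) ^ kf.1.toNat * y)
        = ((σ kf.2).map (fun Q => Q ++ [(d + 1, kf.1)])).map pval := by
    intro kf
    rw [h1 kf.2, List.map_map, List.map_map]
    apply List.map_congr_left
    intro Q _
    simp only [Function.comp_apply, pval_snoc]
    rfl
  have htgetD : ∀ x,
      (((pairsP n (d + 1)).filter (fun kf => r.contains kf.2)).foldl (fun temp kf =>
          temp.modify (kf.2 * (d * (d + 1) ^ (kf.1 - 1).toNat)) []
            (fun l => l ++ (r.getD kf.2 []).map (fun y => (d + 1) ^ kf.1.toNat * y)))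
          (PySem.Dict.empty : PySem.Dict Int (List Int))).getD x []
        = (contrib x).map pval := by
    intro x
    have hg := foldl_modify_getD ((pairsP n (d + 1)).filter (fun kf => r.contains kf.2))
        (fun kf => kf.2 * (d * (d + 1) ^ (kf.1 - 1).toNat))
        (fun kf => (r.getD kf.2 []).map (fun y => (d + 1) ^ kf.1.toNat * y))
        PySem.Dict.empty x
    rw [hg, PySem.Dict.getD_empty, List.nil_append, hfiltcong x, hcontrib]
    rw [List.map_flatMap]
    apply List.flatMap_congr ?_    -- pointwise chunks
    intro kf _
    exact hchunk kf
  have hchne : ∀ x, ∀ kf ∈ (pairsP n (d + 1)).filter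
      (fun kf => !(σ kf.2).isEmpty && (kf.2 * phik (d + 1) kf.1 == x)),
      (σ kf.2).map (fun Q => Q ++ [(d + 1, kf.1)]) ≠ [] := by
    intro x kf hkf
    rw [List.mem_filter] at hkf
    have := hkf.2
    simp only [Bool.and_eq_true, Bool.not_eq_true', List.isEmpty_eq_false_iff] at this
    simpa using this.1
  have htcontains : ∀ x,
      (((pairsP n (d + 1)).filter (fun kf => r.contains kf.2)).foldl (fun temp kf =>
          temp.modify (kf.2 * (d * (d + 1) ^ (kf.1 - 1).toNat)) []
            (fun l => l ++ (r.getD kf.2 []).map (fun y => (d + 1) ^ kf.1.toNat * y)))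
          (PySem.Dict.empty : PySem.Dict Int (List Int))).contains x
        = !(contrib x).isEmpty := by
    intro x
    have hg := foldl_modify_contains ((pairsP n (d + 1)).filter (fun kf => r.contains kf.2))
        (fun kf => kf.2 * (d * (d + 1) ^ (kf.1 - 1).toNat))
        (fun kf => (r.getD kf.2 []).map (fun y => (d + 1) ^ kf.1.toNat * y))
        PySem.Dict.empty x
    rw [hg, PySem.Dict.contains_empty, Bool.false_or]
    rw [List.any_filter, hcontrib]
    rw [flatMap_eq_nil_iff_filtered _ _ (hchne x)]
    rw [← hfiltcong x, ← List.any_filter]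
    rw [any_eq_not_isEmpty_filter]
  have htnodup :
      (((pairsP n (d + 1)).filter (fun kf => r.contains kf.2)).foldl (fun temp kf =>
          temp.modify (kf.2 * (d * (d + 1) ^ (kf.1 - 1).toNat)) []
            (fun l => l ++ (r.getD kf.2 []).map (fun y => (d + 1) ^ kf.1.toNat * y)))
          (PySem.Dict.empty : PySem.Dict Int (List Int))).keys.Nodup := by
    exact PySem.Dict.nodup_keys_foldl_modify_key
      ((pairsP n (d + 1)).filter (fun kf => r.contains kf.2))
      (fun (kf : Int × Int) => kf.2 * (d * (d + 1) ^ (kf.1 - 1).toNat))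
      [] (fun t (kf : Int × Int) => fun l => l ++ (r.getD kf.2 []).map (fun y => (d + 1) ^ kf.1.toNat * y))
      PySem.Dict.empty PySem.Dict.nodup_keys_empty
  rw [htemp]
  refine ⟨?_, ?_, ?_⟩
  · intro x
    rw [items_foldl_getD _ htnodup r x, h1 x, htgetD x]
    show _ = ((σ x) ++ contrib x).map pval
    rw [List.map_append]
  · intro x
    rw [items_foldl_contains _ htnodup r x, h2 x, htcontains x]
    show _ = !((σ x) ++ contrib x).isEmpty
    cases hσ : σ x <;> simp
  · exact PySem.Dict.nodup_keys_foldl_modify_key _ (fun (iv : Int × List Int) => iv.1) []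
      (fun t (iv : Int × List Int) => fun l => l ++ iv.2) r h3

lemma fold_INV (n : Int) :
    ∀ (ds : List Int) (r : PySem.Dict Int (List Int)) (σ : Int → List (List (Int × Int))),
      (∀ x, r.getD x [] = (σ x).map pval) → (∀ x, r.contains x = !(σ x).isEmpty) → r.keys.Nodup →
      (∀ x, (ds.foldl (cbody n) r).getD x [] = ((ds.foldl (abody n) σ) x).map pval) ∧
      (∀ x, (ds.foldl (cbody n) r).contains x = !((ds.foldl (abody n) σ) x).isEmpty) := by
  intro ds
  induction ds with
  | nil => intro r σ h1 h2 h3; exact ⟨h1, h2⟩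
  | cons d ds ih =>
    intro r σ h1 h2 h3
    rw [List.foldl_cons, List.foldl_cons]
    obtain ⟨s1, s2, s3⟩ := step_INV n d r σ h1 h2 h3
    exact ih (cbody n r d) (abody n σ d) s1 s2 s3

lemma AOK_bounds (n : Int) : ∀ (Q : List (Int × Int)), AOK n Q → ∀ e ∈ Q, 1 ≤ e.2 := by
  intro Q
  induction Q using List.reverseRecOn with
  | nil => intro _ e he; simp at he
  | append_singleton Q' a ih =>
    intro hok e he
    have hsplit : Q' ++ [a] = Q' ++ [(a.1, a.2)] := by simp
    rw [hsplit, AOK_snoc] at hok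
    rcases List.mem_append.mp he with h | h
    · exact ih hok.2.2.2.2.2 e h
    · simp at h
      subst h
      exact hok.1

lemma A_eq (n : Int) :
    InverseEulerPhi n =
      (if ((pvDivisors n).foldl (cbody n) (PySem.Dict.empty.insert 1 [1])).contains n
       then PySem.List.sorted
         (((pvDivisors n).foldl (cbody n) (PySem.Dict.empty.insert 1 [1])).getD n []) (fun x => x) false
       else []) := rfl

lemma B_eq (n : Int) :
    InverseEulerPhi_alt n =
      PySem.List.sorted
        ((Epat (((pvDivisors n).filter (fun d => pvIsPrime (d + 1))).map (fun d => d + 1)) n).map pval)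
        (fun x => x) false := by
  show PySem.List.sorted
      (pvRec (((pvDivisors n).filter (fun d => pvIsPrime (d + 1))).map (fun d => d + 1)) n)
      (fun x => x) false = _
  rw [pvRec_eq_map_pval]

lemma abody_to_G (n : Int) :
    (pvDivisors n).foldl (abody n) sigma0
      = ((((pvDivisors n).filter (fun d => pvIsPrime (d + 1))).map (fun d => d + 1)).foldl
          (AStepP n) sigma0) := by
  unfold abody
  rw [PySem.List.foldl_if_eq_foldl_filter (fun d => pvIsPrime (d + 1))
    (fun σ d => AStepP n σ (d + 1)) (pvDivisors n) sigma0]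
  rw [List.foldl_map]

lemma A_link (n : Int) :
    InverseEulerPhi n = PySem.List.sorted
      (((((pvDivisors n).filter (fun d => pvIsPrime (d + 1))).map (fun d => d + 1)).foldl
          (AStepP n) sigma0 n).map pval) (fun x => x) false := by
  have hi1 : ∀ x, (PySem.Dict.empty.insert 1 [1] : PySem.Dict Int (List Int)).getD x []
      = (sigma0 x).map pval := by
    intro x
    rw [PySem.Dict.getD_insert]
    by_cases hx : x = 1
    · rw [if_pos hx]; simp [sigma0, hx, pval]
    · rw [if_neg hx, PySem.Dict.getD_empty]; simp [sigma0, hx]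
  have hi2 : ∀ x, (PySem.Dict.empty.insert 1 [1] : PySem.Dict Int (List Int)).contains x
      = !(sigma0 x).isEmpty := by
    intro x
    rw [PySem.Dict.contains_insert, PySem.Dict.contains_empty]
    by_cases hx : x = 1
    · simp [sigma0, hx]
    · have : (x == (1:Int)) = false := by simpa using hx
      simp [sigma0, hx, this]
  have hi3 : (PySem.Dict.empty.insert 1 [1] : PySem.Dict Int (List Int)).keys.Nodup :=
    PySem.Dict.nodup_keys_insert _ _ _ PySem.Dict.nodup_keys_empty
  obtain ⟨hg, hc⟩ := fold_INV n (pvDivisors n) (PySem.Dict.empty.insert 1 [1]) sigma0 hi1 hi2 hi3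
  rw [A_eq n, hc n, hg n, abody_to_G n]
  cases hσ : (((pvDivisors n).filter (fun d => pvIsPrime (d + 1))).map (fun d => d + 1)).foldl
      (AStepP n) sigma0 n with
  | nil => rfl
  | cons a t => simp

-- ===== VERDICT (by name: the statement is the Claim_ definition above) =====
theorem InverseEulerPhi_spec : Claim_equal_InverseEulerPhi := by
  intro n hdom hpre
  unfold Spec_InverseEulerPhi
  by_cases hn0 : n = 0
  · subst hn0
    decide
  · have hn1 : 1 ≤ n := by
      have : 0 ≤ n := hpre
      omega
    set ps := (((pvDivisors n).filter (fun d => pvIsPrime (d + 1))).map (fun d => d + 1)) with hps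
    have hps2 : ∀ p ∈ ps, 2 ≤ p := by
      intro p hp
      rw [hps, List.mem_map] at hp
      obtain ⟨d, hd, rfl⟩ := hp
      rw [List.mem_filter] at hd
      obtain ⟨h1d, -, -⟩ := (mem_pvDivisors n (by omega) d).mp hd.1
      omega
    have hnd : ps.Nodup := by
      rw [hps]
      apply List.Nodup.map
      · intro a b hab; simpa using hab
      · exact (nodup_pvDivisors n (by omega)).filter _
    have hperm : (ps.foldl (AStepP n) sigma0 n).Perm (Epat ps n) := by
      rw [List.perm_ext_iff_of_nodup (nodup_Gfold n hn1 ps hnd hps2 n) (nodup_Epat ps hnd hps2 n)]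
      intro Q
      rw [mem_Gfold n hn1 ps hps2 n Q, mem_Epat ps hps2 n hn1 Q]
      constructor
      · rintro ⟨hsub, hphi, hok⟩
        exact ⟨hsub, AOK_bounds n Q hok, hphi⟩
      · rintro ⟨hsub, hks, hphi⟩
        refine ⟨hsub, hphi, dvd_AOK n hn1 Q ?_ (hphi ▸ dvd_refl n)⟩
        intro e he
        refine ⟨hps2 e.1 (hsub.subset (List.mem_map_of_mem he)), hks e he⟩
    rw [A_link n, B_eq n, ← hps]
    exact PySem.List.sorted_eq_sorted_of_perm _ _ (fun x => x) (fun a b h => h) (hperm.map pval)
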